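-- pv_equiv track=rewrite | github.com/darrondai/advent-of-code | year-2025/day-4/accessible_rolls.py | topological_removal
-- ===== SOURCE A (Python) =====
-- from collections import deque
--
-- def get_neighbors(cell: tuple[int, int]) -> list[tuple[int, int]]:
--     DIRECTIONS = (
--         (-1, -1),
--         (-1, 0),
--         (-1, 1),
--         (0, -1),
--         (0, 1),
--         (1, -1),
--         (1, 0),
--         (1, 1),
--     )
--     row, col = cell
--     neighbors = [
--         (row + row_offset, col + col_offset) for row_offset, col_offset in DIRECTIONS
--     ]
--     return neighbors
--
-- def topological_removal(indegrees_by_roll: dict[tuple[int, int], int]) -> int: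
--     THRESHOLD = 4
--     removal_count = 0
--     queue = deque()
--     # initial traversal for adding to queue
--     for roll, indegree in indegrees_by_roll.items():
--         if indegree >= THRESHOLD:
--             continue
--
--         queue.append(roll)
--
--     # spaghetti bc we have to remove when adding to queue
--     # doing it in the initial traversal will cause error bc change during iteration
--     # doing it in the topological traversal causes errors bc ...
--     # some nodes will be double counted before they are visited
--     for cell in queue:
--         del indegrees_by_roll[cell]
--
--     while queue:
--         curr = queue.popleft()
--         removal_count += 1
--
--         for neighbor in get_neighbors(curr):
--             if neighbor not in indegrees_by_roll:
--                 continue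
--
--             indegrees_by_roll[neighbor] -= 1
--             if indegrees_by_roll[neighbor] >= THRESHOLD:
--                 continue
--
--             # append and remove neighbor to avoid double counting
--             queue.append(neighbor)
--             del indegrees_by_roll[neighbor]
--
--     return removal_count
-- ===== SOURCE B (Python) =====
-- def get_neighbors(cell):
--     DIRECTIONS = (
--         (-1, -1), (-1, 0), (-1, 1),
--         (0, -1), (0, 1),
--         (1, -1), (1, 0), (1, 1),
--     )
--     row, col = cell
--     return [(row + r, col + c) for r, c in DIRECTIONS]
--
--
-- def topological_removal(indegrees_by_roll):
--     THRESHOLD = 4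
--     removal_count = 0
--     while True:
--         removable = [cell for cell, indegree in indegrees_by_roll.items()
--                      if indegree < THRESHOLD]
--         if not removable:
--             return removal_count
--         for cell in removable:
--             del indegrees_by_roll[cell]
--         for cell in removable:
--             for neighbor in get_neighbors(cell):
--                 if neighbor in indegrees_by_roll:
--                     indegrees_by_roll[neighbor] -= 1
--         removal_count += len(removable)
-- ===== Notes on version B (the rewrite author's own statement) =====
-- stated objective: alternative
-- what changed: Replaces the deque-driven peel (each cell is enqueued and deleted the moment its indegree drops below the threshold, then processed one at a time) with a round-based fixpoint loop that in each iteration collects ALL currently sub-threshold cells, deletes them, then decrements their surviving neighbours; the removed set and count are the same.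
import Mathlib
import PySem

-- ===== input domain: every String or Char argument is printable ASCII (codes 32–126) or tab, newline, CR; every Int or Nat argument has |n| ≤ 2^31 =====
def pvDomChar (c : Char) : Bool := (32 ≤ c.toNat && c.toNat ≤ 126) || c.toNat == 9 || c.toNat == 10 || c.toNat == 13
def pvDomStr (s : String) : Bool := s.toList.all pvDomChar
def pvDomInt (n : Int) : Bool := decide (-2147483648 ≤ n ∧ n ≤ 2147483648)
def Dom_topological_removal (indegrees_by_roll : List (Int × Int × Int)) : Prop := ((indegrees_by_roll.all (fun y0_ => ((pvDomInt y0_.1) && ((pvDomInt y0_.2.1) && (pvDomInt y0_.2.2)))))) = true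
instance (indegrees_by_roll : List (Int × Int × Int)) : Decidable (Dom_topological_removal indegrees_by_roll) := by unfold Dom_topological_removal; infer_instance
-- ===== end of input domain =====

-- B replaces A's deque-driven peel (enqueue each cell the moment its indegree drops below 4)
-- by a round-based fixpoint loop (each round deletes ALL currently sub-threshold cells, then
-- decrements their surviving neighbours); same count. Objective: alternative decomposition.
-- Note: the Python A mutates its dict argument (B performs the same mutation, reaching the
-- same final dict); the equivalence proved here is about the RETURN value.


-- ===== PORT A =====
-- module helper get_neighbors (B's Source B carries an identical copy; one Lean definition serves both ports)

def get_neighbors (cell : Int × Int) : List (Int × Int) :=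
  let DIRECTIONS : List (Int × Int) :=
    [(-1, -1), (-1, 0), (-1, 1), (0, -1), (0, 1), (1, -1), (1, 0), (1, 1)]
  DIRECTIONS.map (fun off => (cell.1 + off.1, cell.2 + off.2))

-- one step of A's inner 'for neighbor in get_neighbors(curr)' loop; state = (dict, queue)
def pvStepA (st : PySem.Dict (Int × Int) Int × List (Int × Int)) (n : Int × Int) :
    PySem.Dict (Int × Int) Int × List (Int × Int) :=
  if st.1.contains n then
    let d' := st.1.modify n 0 (· - 1)
    if 4 ≤ d'.getD n 0 then (d', st.2)
    else (d'.erase n, st.2 ++ [n])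
  else st

-- A's 'while queue' loop; the fuel argument only makes the recursion structural (it is
-- never exhausted: queue.length + dict.size drops by at least 1 per iteration, see pvLoopA_spec)
def pvLoopA (fuel : Nat) (d : PySem.Dict (Int × Int) Int) (q : List (Int × Int)) (c : Int) : Int :=
  match fuel, q with
  | _, [] => c
  | 0, _ => c
  | fuel + 1, curr :: q =>
      let st := (get_neighbors curr).foldl pvStepA (d, q)
      pvLoopA fuel st.1 st.2 (c + 1)

-- the dict argument is received as an association list, per the type convention
def topological_removal (indegrees_by_roll : List (Int × Int × Int)) : Int :=
  let d0 := PySem.Dict.ofList (indegrees_by_roll.map (fun t => ((t.1, t.2.1), t.2.2)))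
  let queue := d0.items.foldl
    (fun q p => if 4 ≤ p.2 then q else q ++ [p.1]) ([] : List (Int × Int))
  let d1 := queue.foldl (fun d cell => d.erase cell) d0
  pvLoopA (queue.length + d1.size + 1) d1 queue 0

-- ===== PORT B =====
-- decrement every neighbour of `cell` that is still present
def pvDecNbrs (d : PySem.Dict (Int × Int) Int) (cell : Int × Int) : PySem.Dict (Int × Int) Int :=
  (get_neighbors cell).foldl (fun d n => if d.contains n then d.modify n 0 (· - 1) else d) d

-- B's round loop; the fuel argument only makes the recursion structural (it is never
-- exhausted: every round that recurses deletes at least one key, see pvLoopB_spec)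
def pvLoopB (fuel : Nat) (d : PySem.Dict (Int × Int) Int) (c : Int) : Int :=
  match fuel with
  | 0 => c
  | fuel + 1 =>
      let removable := (d.items.filter (fun p => p.2 < 4)).map (·.1)
      if removable.isEmpty then c
      else
        let d1 := removable.foldl (fun d cell => d.erase cell) d
        let d2 := removable.foldl pvDecNbrs d1
        pvLoopB fuel d2 (c + removable.length)

def topological_removal_alt (indegrees_by_roll : List (Int × Int × Int)) : Int :=
  let d0 := PySem.Dict.ofList (indegrees_by_roll.map (fun t => ((t.1, t.2.1), t.2.2)))
  pvLoopB (d0.size + 1) d0 0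

-- ===== PRECONDITION & SPEC =====
def Spec_topological_removal (indegrees_by_roll : List (Int × Int × Int)) (out : Int) : Prop := out = topological_removal_alt indegrees_by_roll
instance (indegrees_by_roll : List (Int × Int × Int)) (out : Int) : Decidable (Spec_topological_removal indegrees_by_roll out) := by unfold Spec_topological_removal; infer_instance

-- ===== CLAIM (what is proved, stated in full; the proofs are below) =====
def Claim_equal_topological_removal : Prop := ∀ (indegrees_by_roll : List (Int × Int × Int)), Dom_topological_removal indegrees_by_roll → Spec_topological_removal indegrees_by_roll (topological_removal indegrees_by_roll)

-- ===== LEMMAS AND PROOFS =====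

-- The two loops are compared through the peeling calculus below: pvVal d0 S k is k's
-- indegree once the cells of S are removed; a removal sequence is pvGood when each cell is
-- sub-threshold at its own removal point, and pvComplete when afterwards every survivor is
-- at or above threshold.  Any two good, duplicate-free, complete sequences have the same
-- length (pvLength_unique); pvLoopA_spec and pvLoopB_spec show each loop returns the length
-- of such a sequence, so the two ports agree (pv_main).

def pvVal (d0 : PySem.Dict (Int × Int) Int) (S : List (Int × Int)) (k : Int × Int) : Int :=
  d0.getD k 0 - (S.countP (fun c => decide (k ∈ get_neighbors c)) : Int)

lemma pvVal_mono (d0 : PySem.Dict (Int × Int) Int) {S T : List (Int × Int)}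
    (hS : S.Nodup) (hsub : S ⊆ T) (k : Int × Int) : pvVal d0 T k ≤ pvVal d0 S k := by
  unfold pvVal
  have h : S.countP (fun c => decide (k ∈ get_neighbors c)) ≤ T.countP (fun c => decide (k ∈ get_neighbors c)) := by
    have h1 : (S.filter (fun c => decide (k ∈ get_neighbors c))).Nodup := hS.filter _
    have h2 : (S.filter (fun c => decide (k ∈ get_neighbors c))) ⊆ (T.filter (fun c => decide (k ∈ get_neighbors c))) := by
      intro x hx
      simp only [List.mem_filter] at hx ⊢
      exact ⟨hsub hx.1, hx.2⟩
    simpa [List.countP_eq_length_filter] using (List.subperm_of_subset h1 h2).length_le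
  omega

lemma nodup_get_neighbors (cell : Int × Int) : (get_neighbors cell).Nodup := by
  unfold get_neighbors
  refine List.Nodup.map ?_ (by decide)
  intro a b hab
  obtain ⟨h1, h2⟩ := Prod.mk.injEq .. ▸ hab
  simp only [Prod.mk.injEq] at hab
  exact Prod.ext (by omega) (by omega)

lemma pvGet?_erase (d : PySem.Dict (Int × Int) Int) (k k' : Int × Int) :
    (d.erase k).get? k' = if k' = k then none else d.get? k' := by
  obtain ⟨items⟩ := d
  show Option.map _ (List.find? _ (items.filter _)) = _
  induction items with
  | nil => simp [PySem.Dict.get?]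
  | cons p rest ih =>
    rw [List.filter_cons]
    by_cases hpk : p.1 = k <;> by_cases hpk' : p.1 = k' <;> by_cases hk' : k' = k <;>
      simp_all [PySem.Dict.get?, beq_iff_eq]

lemma pvKeys_erase (d : PySem.Dict (Int × Int) Int) (k : Int × Int) :
    (d.erase k).keys = d.keys.filter (fun x => !(x == k)) := by
  show (d.items.filter _).map _ = (d.items.map _).filter _
  rw [List.filter_map]
  rfl

lemma pvSize_erase_lt (d : PySem.Dict (Int × Int) Int) (k : Int × Int)
    (h : d.contains k = true) : (d.erase k).size < d.size := by
  show (d.items.filter _).length < d.items.length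
  rw [List.length_filter_lt_length_iff_exists]
  simp only [PySem.Dict.contains, List.any_eq_true] at h
  obtain ⟨p, hp, hpk⟩ := h
  exact ⟨p, hp, by simp [hpk]⟩

def pvGood (d0 : PySem.Dict (Int × Int) Int) : List (Int × Int) → List (Int × Int) → Prop
  | _, [] => True
  | S, k :: P => k ∈ d0.keys ∧ pvVal d0 S k < 4 ∧ pvGood d0 (S ++ [k]) P

def pvComplete (d0 : PySem.Dict (Int × Int) Int) (P : List (Int × Int)) : Prop :=
  ∀ k ∈ d0.keys, k ∉ P → 4 ≤ pvVal d0 P k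

lemma pvGood_subset (d0 : PySem.Dict (Int × Int) Int) {Q : List (Int × Int)}
    (hQc : pvComplete d0 Q) :
    ∀ (P S : List (Int × Int)), pvGood d0 S P → (S ++ P).Nodup → S ⊆ Q → ∀ x ∈ P, x ∈ Q := by
  intro P
  induction P with
  | nil => intro S _ _ _ x hx; simp at hx
  | cons k P ih =>
    intro S hg hn hsub x hx
    obtain ⟨hk0, hkv, hg'⟩ := hg
    have hSn : S.Nodup := (List.nodup_append.mp hn).1
    have hkQ : k ∈ Q := by
      by_contra hkQ
      have h1 := hQc k hk0 hkQ
      have h2 := pvVal_mono d0 hSn hsub k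
      omega
    have hn' : ((S ++ [k]) ++ P).Nodup := by
      simpa [List.append_assoc] using hn
    have hsub' : (S ++ [k]) ⊆ Q := by
      intro y hy
      rcases List.mem_append.mp hy with h | h
      · exact hsub h
      · simp at h; subst h; exact hkQ
    rcases List.mem_cons.mp hx with h | h
    · subst h; exact hkQ
    · exact ih (S ++ [k]) hg' hn' hsub' x h

lemma pvLength_unique (d0 : PySem.Dict (Int × Int) Int) {P Q : List (Int × Int)}
    (hP : pvGood d0 [] P) (hPn : P.Nodup) (hPc : pvComplete d0 P)
    (hQ : pvGood d0 [] Q) (hQn : Q.Nodup) (hQc : pvComplete d0 Q) : P.length = Q.length := by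
  have h1 : ∀ x ∈ P, x ∈ Q := pvGood_subset d0 hQc P [] hP (by simpa using hPn) (by simp)
  have h2 : ∀ x ∈ Q, x ∈ P := pvGood_subset d0 hPc Q [] hQ (by simpa using hQn) (by simp)
  exact List.Perm.length_eq ((List.perm_ext_iff_of_nodup hPn hQn).mpr (fun x => ⟨h1 x, h2 x⟩))

lemma pvGood_of_forall (d0 : PySem.Dict (Int × Int) Int) :
    ∀ (R S : List (Int × Int)), (S ++ R).Nodup →
    (∀ r ∈ R, r ∈ d0.keys ∧ pvVal d0 S r < 4) → pvGood d0 S R := by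
  intro R
  induction R with
  | nil => intro S _ _; trivial
  | cons r R ih =>
    intro S hn hall
    obtain ⟨h1, h2⟩ := hall r (by simp)
    refine ⟨h1, h2, ?_⟩
    have hSn : S.Nodup := (List.nodup_append.mp hn).1
    refine ih (S ++ [r]) (by simpa [List.append_assoc] using hn) ?_
    intro x hx
    obtain ⟨h3, h4⟩ := hall x (by simp [hx])
    have := pvVal_mono d0 hSn (List.subset_append_left S [r]) x
    exact ⟨h3, by omega⟩

lemma pvGet?_eraseFold (R : List (Int × Int)) (d : PySem.Dict (Int × Int) Int) (k : Int × Int) :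
    (R.foldl (fun d cell => d.erase cell) d).get? k = if k ∈ R then none else d.get? k := by
  induction R generalizing d with
  | nil => simp
  | cons r R ih =>
    simp only [List.foldl_cons, ih, pvGet?_erase, List.mem_cons]
    by_cases h1 : k ∈ R <;> by_cases h2 : k = r <;> simp [h1, h2]

lemma pvKeys_eraseFold (R : List (Int × Int)) (d : PySem.Dict (Int × Int) Int) :
    (R.foldl (fun d cell => d.erase cell) d).keys = d.keys.filter (fun x => decide (x ∉ R)) := by
  induction R generalizing d with
  | nil => simp
  | cons r R ih =>
    simp only [List.foldl_cons, ih, pvKeys_erase, List.filter_filter]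
    apply List.filter_congr
    intro x _
    by_cases h1 : x ∈ R <;> by_cases h2 : x = r <;> simp [h1, h2]

lemma pvQBuild (l : List ((Int × Int) × Int)) (acc : List (Int × Int)) :
    l.foldl (fun q p => if 4 ≤ p.2 then q else q ++ [p.1]) acc
      = acc ++ (l.filter (fun p => decide (p.2 < 4))).map (·.1) := by
  induction l generalizing acc with
  | nil => simp
  | cons p l ih =>
    simp only [List.foldl_cons, List.filter_cons]
    by_cases h : 4 ≤ p.2
    · have : ¬ p.2 < 4 := by omega
      simp [h, this, ih]
    · have : p.2 < 4 := by omega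
      simp [h, this, ih]

lemma pvRem_sublist (d : PySem.Dict (Int × Int) Int) :
    ((d.items.filter (fun p => decide (p.2 < 4))).map (·.1)).Sublist d.keys := by
  exact List.Sublist.map _ List.filter_sublist

lemma pvMem_rem (d : PySem.Dict (Int × Int) Int) (hnd : d.keys.Nodup) (k : Int × Int) :
    k ∈ (d.items.filter (fun p => decide (p.2 < 4))).map (·.1) ↔
      k ∈ d.keys ∧ d.getD k 0 < 4 := by
  constructor
  · intro h
    simp only [List.mem_map, List.mem_filter] at h
    obtain ⟨p, ⟨hp, hv⟩, hk⟩ := h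
    subst hk
    have := PySem.Dict.get?_of_mem_items d (by exact hp) hnd
    constructor
    · exact List.mem_map_of_mem hp
    · rw [PySem.Dict.getD_eq_get?_getD, this]
      simpa using hv
  · rintro ⟨h1, h2⟩
    obtain ⟨⟨k1, v⟩, hp, hk⟩ := List.mem_map.mp h1
    simp only at hk
    subst hk
    have := PySem.Dict.get?_of_mem_items d hp hnd
    rw [PySem.Dict.getD_eq_get?_getD, this] at h2
    simp only [Option.getD_some] at h2
    exact List.mem_map.mpr ⟨(k1, v), List.mem_filter.mpr ⟨hp, by simpa⟩, rfl⟩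

def pvDrops (d : PySem.Dict (Int × Int) Int) (k : Int × Int) : Bool :=
  match d.get? k with
  | some v => decide (v - 1 < 4)
  | none => false

lemma pvGet?_modify (d : PySem.Dict (Int × Int) Int) (n k : Int × Int) (f : Int → Int) :
    (d.modify n 0 f).get? k = if k = n then some (f (d.getD n 0)) else d.get? k := by
  show (d.insert n _).get? k = _
  rw [PySem.Dict.get?_insert]

lemma pvKeys_modify_contains (d : PySem.Dict (Int × Int) Int) (n : Int × Int) (f : Int → Int)
    (h : d.contains n = true) : (d.modify n 0 f).keys = d.keys := by
  rw [PySem.Dict.keys_modify, PySem.Dict.keys_insert_of_contains]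
  exact h

lemma pvSize_modify_contains (d : PySem.Dict (Int × Int) Int) (n : Int × Int) (f : Int → Int)
    (h : d.contains n = true) : (d.modify n 0 f).size = d.size := by
  show (d.insert n _).size = d.size
  rw [PySem.Dict.size_insert]
  simp [h]

-- single-step characterisation of pvStepA

lemma pvStepA_char (d : PySem.Dict (Int × Int) Int) (q : List (Int × Int)) (n : Int × Int) :
    (∀ k, (pvStepA (d, q) n).1.get? k =
        if k = n then (if pvDrops d n then none else (d.get? n).map (· - 1)) else d.get? k)
    ∧ (pvStepA (d, q) n).2 = q ++ (if pvDrops d n then [n] else [])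
    ∧ ((pvStepA (d, q) n).1.keys = d.keys ∨
        (pvStepA (d, q) n).1.keys = d.keys.filter (fun x => !(x == n)))
    ∧ (pvStepA (d, q) n).2.length + (pvStepA (d, q) n).1.size ≤ q.length + d.size := by
  by_cases hc : d.contains n = true
  · have hmem : n ∈ d.keys := (PySem.Dict.contains_iff_mem_keys d n).mp hc
    obtain ⟨v, hv⟩ : ∃ v, d.get? n = some v := by
      rcases h : d.get? n with _ | v
      · exact absurd ((PySem.Dict.get?_eq_none_iff_not_mem_keys d n).mp h) (by simp [hmem])
      · exact ⟨v, rfl⟩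
    have hgetD : d.getD n 0 = v := by rw [PySem.Dict.getD_eq_get?_getD, hv]; rfl
    have hgd' : (d.modify n 0 (· - 1)).getD n 0 = v - 1 := by
      rw [PySem.Dict.getD_modify_self, hgetD]
    have hdrops : pvDrops d n = decide (v - 1 < 4) := by simp [pvDrops, hv]
    by_cases hth : 4 ≤ v - 1
    · -- survives
      have hnd : pvDrops d n = false := by simp [hdrops]; omega
      have hstep : pvStepA (d, q) n = (d.modify n 0 (· - 1), q) := by
        simp [pvStepA, hc, hgd', hth]
      rw [hstep]
      refine ⟨?_, by simp [hnd], Or.inl (pvKeys_modify_contains d n _ hc), ?_⟩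
      · intro k
        rw [pvGet?_modify]
        by_cases hk : k = n <;> simp [hk, hnd, hv, hgetD]
      · simp [pvSize_modify_contains d n _ hc]
    · -- dropped
      have hnd : pvDrops d n = true := by simp [hdrops]; omega
      have hstep : pvStepA (d, q) n = ((d.modify n 0 (· - 1)).erase n, q ++ [n]) := by
        simp [pvStepA, hc, hgd', hth]
      rw [hstep]
      have hc' : (d.modify n 0 (· - 1)).contains n = true := by
        rw [PySem.Dict.contains_modify]; simp
      refine ⟨?_, by simp [hnd], ?_, ?_⟩
      · intro k
        rw [pvGet?_erase, pvGet?_modify]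
        by_cases hk : k = n <;> simp [hk, hnd]
      · right
        rw [pvKeys_erase, pvKeys_modify_contains d n _ hc]
      · have h1 := pvSize_erase_lt (d.modify n 0 (· - 1)) n hc'
        have h2 := pvSize_modify_contains d n (· - 1) hc
        simp only [List.length_append, List.length_cons, List.length_nil]
        omega
  · -- neighbor not present
    have hmem : n ∉ d.keys := fun h => hc ((PySem.Dict.contains_iff_mem_keys d n).mpr h)
    have hnone : d.get? n = none := (PySem.Dict.get?_eq_none_iff_not_mem_keys d n).mpr hmem
    have hnd : pvDrops d n = false := by simp [pvDrops, hnone]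
    have hstep : pvStepA (d, q) n = (d, q) := by simp [pvStepA, hc]
    rw [hstep]
    refine ⟨?_, by simp [hnd], Or.inl rfl, by simp⟩
    intro k
    by_cases hk : k = n <;> simp [hk, hnd, hnone]

lemma pvStepA_foldl (ns : List (Int × Int)) (hns : ns.Nodup)
    (d : PySem.Dict (Int × Int) Int) (q : List (Int × Int)) (hnd : d.keys.Nodup) :
    (∀ k, (ns.foldl pvStepA (d, q)).1.get? k =
        if k ∈ ns then (if pvDrops d k then none else (d.get? k).map (· - 1))
        else d.get? k)
    ∧ (ns.foldl pvStepA (d, q)).2 = q ++ ns.filter (pvDrops d)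
    ∧ (ns.foldl pvStepA (d, q)).1.keys.Nodup
    ∧ (ns.foldl pvStepA (d, q)).2.length + (ns.foldl pvStepA (d, q)).1.size ≤ q.length + d.size := by
  induction ns generalizing d q with
  | nil => exact ⟨by simp, by simp, hnd, le_refl _⟩
  | cons n ns ih =>
    obtain ⟨hn_ns, hns'⟩ := List.nodup_cons.mp hns
    obtain ⟨hg, hq, hk, hsz⟩ := pvStepA_char d q n
    set st1 := pvStepA (d, q) n with hst1
    have hnd1 : st1.1.keys.Nodup := by
      rcases hk with h | h
      · rw [h]; exact hnd
      · rw [h]; exact hnd.filter _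
    have hfold : (n :: ns).foldl pvStepA (d, q) = ns.foldl pvStepA (st1.1, st1.2) := by
      simp [← hst1]
    obtain ⟨ihg, ihq, ihk, ihsz⟩ := ih hns' st1.1 st1.2 hnd1
    -- get? at any k ≠ n is unchanged by the first step, hence pvDrops too
    have hgne : ∀ k, k ≠ n → st1.1.get? k = d.get? k := by
      intro k hkn; rw [hg k, if_neg hkn]
    have hdne : ∀ k, k ≠ n → pvDrops st1.1 k = pvDrops d k := by
      intro k hkn; simp [pvDrops, hgne k hkn]
    refine ⟨?_, ?_, by rw [hfold]; exact ihk, ?_⟩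
    · intro k
      rw [hfold, ihg k]
      by_cases hkn : k = n
      · subst hkn
        rw [if_neg hn_ns, hg k, if_pos rfl]
        have hmem : k ∈ k :: ns := by simp
        rw [if_pos hmem]
      · rw [hgne k hkn, hdne k hkn]
        by_cases hk2 : k ∈ ns
        · rw [if_pos hk2, if_pos (List.mem_cons.mpr (Or.inr hk2))]
        · rw [if_neg hk2, if_neg (by simp [hkn, hk2])]
    · rw [hfold, ihq, hq, List.filter_cons]
      have : ns.filter (pvDrops st1.1) = ns.filter (pvDrops d) :=
        List.filter_congr (fun x hx => hdne x (fun h => hn_ns (h ▸ hx)))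
      rw [this]
      by_cases hd : pvDrops d n <;> simp [hd]
    · rw [hfold]; omega

lemma pvDecStep_get? (d : PySem.Dict (Int × Int) Int) (n k : Int × Int) :
    (if d.contains n then d.modify n 0 (· - 1) else d).get? k =
      if k = n then (d.get? n).map (· - 1) else d.get? k := by
  by_cases hc : d.contains n = true
  · rw [if_pos hc, pvGet?_modify]
    by_cases hk : k = n
    · subst hk
      rw [if_pos rfl, if_pos rfl]
      obtain ⟨v, hv⟩ : ∃ v, d.get? k = some v := by
        rcases h : d.get? k with _ | v
        · exact absurd ((PySem.Dict.get?_eq_none_iff_not_mem_keys d k).mp h)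
            (by simp [(PySem.Dict.contains_iff_mem_keys d k).mp hc])
        · exact ⟨v, rfl⟩
      rw [PySem.Dict.getD_eq_get?_getD, hv]
      simp
    · simp [hk]
  · rw [if_neg hc]
    by_cases hk : k = n
    · subst hk
      have : d.get? k = none := (PySem.Dict.get?_eq_none_iff_not_mem_keys d k).mpr
        (fun h => hc ((PySem.Dict.contains_iff_mem_keys d k).mpr h))
      simp [this]
    · simp [hk]

lemma pvDecStep_keys (d : PySem.Dict (Int × Int) Int) (n : Int × Int) :
    (if d.contains n then d.modify n 0 (· - 1) else d).keys = d.keys := by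
  by_cases hc : d.contains n = true
  · rw [if_pos hc, pvKeys_modify_contains d n _ hc]
  · rw [if_neg hc]

lemma pvDecNbrs_get? (d : PySem.Dict (Int × Int) Int) (cell : Int × Int) (k : Int × Int) :
    (pvDecNbrs d cell).get? k =
      if k ∈ get_neighbors cell then (d.get? k).map (· - 1) else d.get? k := by
  unfold pvDecNbrs
  have hns := nodup_get_neighbors cell
  generalize get_neighbors cell = ns at *
  induction ns generalizing d with
  | nil => simp
  | cons n ns ih =>
    obtain ⟨hn_ns, hns'⟩ := List.nodup_cons.mp hns
    rw [List.foldl_cons, ih _ hns']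
    by_cases hkn : k = n
    · subst hkn
      rw [if_neg hn_ns, pvDecStep_get? d k k, if_pos rfl, if_pos (show k ∈ k :: ns by simp)]
    · rw [pvDecStep_get? d n k, if_neg hkn]
      by_cases hk2 : k ∈ ns
      · rw [if_pos hk2, if_pos (List.mem_cons.mpr (Or.inr hk2))]
      · rw [if_neg hk2, if_neg (by simp [hkn, hk2])]

lemma pvDecNbrs_keys (d : PySem.Dict (Int × Int) Int) (cell : Int × Int) :
    (pvDecNbrs d cell).keys = d.keys := by
  unfold pvDecNbrs
  generalize get_neighbors cell = ns
  induction ns generalizing d with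
  | nil => rfl
  | cons n ns ih =>
    rw [List.foldl_cons, ih, pvDecStep_keys]

lemma pvDecFold_get? (R : List (Int × Int)) (d : PySem.Dict (Int × Int) Int) (k : Int × Int) :
    (R.foldl pvDecNbrs d).get? k =
      (d.get? k).map (fun v => v - (R.countP (fun c => decide (k ∈ get_neighbors c)) : Int)) := by
  induction R generalizing d with
  | nil => simp
  | cons r R ih =>
    rw [List.foldl_cons, ih, pvDecNbrs_get?]
    by_cases hk : k ∈ get_neighbors r
    · rw [if_pos hk]
      rcases h : d.get? k with _ | v
      · simp
      · simp only [Option.map_some, List.countP_cons, hk, decide_true]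
        congr 1
        push_cast
        ring
    · rw [if_neg hk, List.countP_cons]
      simp [hk]

lemma pvDecFold_keys (R : List (Int × Int)) (d : PySem.Dict (Int × Int) Int) :
    (R.foldl pvDecNbrs d).keys = d.keys := by
  induction R generalizing d with
  | nil => rfl
  | cons r R ih => rw [List.foldl_cons, ih, pvDecNbrs_keys]

lemma pvGood_append (d0 : PySem.Dict (Int × Int) Int) :
    ∀ (X S Y : List (Int × Int)), pvGood d0 S X → pvGood d0 (S ++ X) Y → pvGood d0 S (X ++ Y) := by
  intro X
  induction X with
  | nil => intro S Y _ h; simpa using h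
  | cons x X ih =>
    intro S Y hX hY
    obtain ⟨h1, h2, h3⟩ := hX
    exact ⟨h1, h2, ih (S ++ [x]) Y h3 (by simpa [List.append_assoc] using hY)⟩

lemma pvVal_append (d0 : PySem.Dict (Int × Int) Int) (P R : List (Int × Int)) (k : Int × Int) :
    pvVal d0 (P ++ R) k =
      pvVal d0 P k - (R.countP (fun c => decide (k ∈ get_neighbors c)) : Int) := by
  unfold pvVal
  rw [List.countP_append]
  push_cast
  ring

lemma pvLoopB_spec (d0 : PySem.Dict (Int × Int) Int) :
    ∀ (fuel : Nat) (d : PySem.Dict (Int × Int) Int) (P : List (Int × Int)) (c : Int),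
    d.size < fuel →
    d.keys.Nodup →
    (P ++ d.keys).Nodup →
    (∀ k, k ∈ d0.keys ↔ (k ∈ P ∨ k ∈ d.keys)) →
    (∀ k ∈ d.keys, d.get? k = some (pvVal d0 P k)) →
    ∃ Q, pvLoopB fuel d c = c + Q.length ∧ pvGood d0 P Q ∧ (P ++ Q).Nodup ∧
      pvComplete d0 (P ++ Q) := by
  intro fuel
  induction fuel with
  | zero => intro d P c h; omega
  | succ fuel ih =>
    intro d P c hfuel hnd hppd hpart hval
    by_cases hR : ((d.items.filter (fun p => p.2 < 4)).map (·.1)).isEmpty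
    · -- no removable cell: the loop returns c
      refine ⟨[], ?_, trivial, by simpa using List.Nodup.of_append_left hppd, ?_⟩
      · show pvLoopB (fuel + 1) d c = c + 0
        simp [pvLoopB, hR]
      · intro k hk0 hkP
        simp only [List.append_nil] at hkP ⊢
        have hkd : k ∈ d.keys := ((hpart k).mp hk0).resolve_left hkP
        have hgetD : d.getD k 0 = pvVal d0 P k := by
          rw [PySem.Dict.getD_eq_get?_getD, hval k hkd]; rfl
        rw [List.isEmpty_iff] at hR
        have hnm : ¬ (k ∈ d.keys ∧ d.getD k 0 < 4) := by
          intro hc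
          have hmem := (pvMem_rem d hnd k).mpr hc
          rw [hR] at hmem
          simp at hmem
        have h4 : ¬ d.getD k 0 < 4 := fun h => hnm ⟨hkd, h⟩
        omega
    · -- a nonempty round
      set R := (d.items.filter (fun p => p.2 < 4)).map (·.1) with hRdef
      have hRsubl := pvRem_sublist d
      have hRsub : R ⊆ d.keys := hRsubl.subset
      have hRnd : R.Nodup := hRsubl.nodup hnd
      have hmemR : ∀ k, k ∈ R ↔ k ∈ d.keys ∧ d.getD k 0 < 4 := pvMem_rem d hnd
      have hPnd : P.Nodup := List.Nodup.of_append_left hppd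
      have hdisjPK : ∀ x ∈ P, x ∉ d.keys := by
        intro x hx hk
        exact (List.nodup_append.mp hppd).2.2 x hx x hk rfl
      set d1 := R.foldl (fun d cell => d.erase cell) d with hd1def
      set d2 := R.foldl pvDecNbrs d1 with hd2def
      have hkeys2 : d2.keys = d.keys.filter (fun x => decide (x ∉ R)) := by
        rw [hd2def, pvDecFold_keys, hd1def, pvKeys_eraseFold]
      have hnd2 : d2.keys.Nodup := by rw [hkeys2]; exact hnd.filter _
      have hget2 : ∀ k, d2.get? k = (if k ∈ R then none else d.get? k).map
          (fun v => v - (R.countP (fun c => decide (k ∈ get_neighbors c)) : Int)) := by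
        intro k
        rw [hd2def, pvDecFold_get?, hd1def, pvGet?_eraseFold]
      have hmem2 : ∀ k, k ∈ d2.keys ↔ (k ∈ d.keys ∧ k ∉ R) := by
        intro k; rw [hkeys2]; simp
      have hgetDval : ∀ k ∈ d.keys, d.getD k 0 = pvVal d0 P k := by
        intro k hk; rw [PySem.Dict.getD_eq_get?_getD, hval k hk]; rfl
      have hsizekeys : ∀ (e : PySem.Dict (Int × Int) Int), e.keys.length = e.size :=
        fun e => List.length_map ..
      have hr0 : ∃ r, r ∈ R := by
        rcases hRe : R with _ | ⟨r, R'⟩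
        · rw [hRe] at hR; simp at hR
        · exact ⟨r, by simp⟩
      have hsize2 : d2.size < d.size := by
        obtain ⟨r, hr⟩ := hr0
        have hlt := (List.length_filter_lt_length_iff_exists
          (l := d.keys) (p := fun x => decide (x ∉ R))).mpr ⟨r, hRsub hr, by simp [hr]⟩
        have e1 := hsizekeys d2
        have e2 := hsizekeys d
        rw [hkeys2] at e1
        omega
      have hpart2 : ∀ k, k ∈ d0.keys ↔ (k ∈ P ++ R ∨ k ∈ d2.keys) := by
        intro k
        rw [hpart k, List.mem_append, hmem2 k]
        constructor
        · rintro (h | h)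
          · exact Or.inl (Or.inl h)
          · by_cases hkR : k ∈ R
            · exact Or.inl (Or.inr hkR)
            · exact Or.inr ⟨h, hkR⟩
        · rintro ((h | h) | ⟨h, _⟩)
          · exact Or.inl h
          · exact Or.inr (hRsub h)
          · exact Or.inr h
      have hppd2 : ((P ++ R) ++ d2.keys).Nodup := by
        rw [List.append_assoc, List.nodup_append]
        refine ⟨hPnd, ?_, ?_⟩
        · rw [List.nodup_append]
          refine ⟨hRnd, hnd2, ?_⟩
          intro a ha b hb hab
          subst hab
          exact ((hmem2 a).mp hb).2 ha
        · intro a ha b hb hab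
          subst hab
          rcases List.mem_append.mp hb with h | h
          · exact hdisjPK a ha (hRsub h)
          · exact hdisjPK a ha ((hmem2 a).mp h).1
      have hval2 : ∀ k ∈ d2.keys, d2.get? k = some (pvVal d0 (P ++ R) k) := by
        intro k hk
        obtain ⟨hkd, hkR⟩ := (hmem2 k).mp hk
        rw [hget2 k, if_neg hkR, hval k hkd]
        simp only [Option.map_some]
        rw [pvVal_append]
      have hgoodR : pvGood d0 P R := by
        refine pvGood_of_forall d0 R P ?_ ?_
        · rw [List.nodup_append]
          refine ⟨hPnd, hRnd, ?_⟩
          intro a ha b hb hab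
          subst hab
          exact hdisjPK a ha (hRsub hb)
        · intro r hr
          obtain ⟨hrd, hrv⟩ := (hmemR r).mp hr
          refine ⟨(hpart r).mpr (Or.inr hrd), ?_⟩
          rw [← hgetDval r hrd]; exact hrv
      have hstep : pvLoopB (fuel + 1) d c = pvLoopB fuel d2 (c + R.length) := by
        rw [pvLoopB]
        simp only [← hRdef, ← hd1def, ← hd2def]
        rw [if_neg hR]
      obtain ⟨Q', hlen, hgood', hnodup', hcomp'⟩ :=
        ih d2 (P ++ R) (c + R.length) (by omega) hnd2 hppd2 hpart2 hval2
      refine ⟨R ++ Q', ?_, ?_, ?_, ?_⟩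
      · rw [hstep, hlen, List.length_append]; push_cast; ring
      · exact pvGood_append d0 R P Q' hgoodR hgood'
      · simpa [List.append_assoc] using hnodup'
      · intro k hk hkmem
        have := hcomp' k hk (by simpa [List.append_assoc] using hkmem)
        simpa [List.append_assoc] using this

lemma pvVal_snoc (d0 : PySem.Dict (Int × Int) Int) (P : List (Int × Int)) (curr k : Int × Int) :
    pvVal d0 (P ++ [curr]) k =
      pvVal d0 P k - (if k ∈ get_neighbors curr then 1 else 0) := by
  rw [pvVal_append]
  by_cases h : k ∈ get_neighbors curr <;> simp [h]

lemma pvMem_of_get?_some (d : PySem.Dict (Int × Int) Int) (k : Int × Int) (v : Int)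
    (h : d.get? k = some v) : k ∈ d.keys := by
  by_contra hk
  rw [(PySem.Dict.get?_eq_none_iff_not_mem_keys d k).mpr hk] at h
  simp at h

lemma pvLoopA_spec (d0 : PySem.Dict (Int × Int) Int) :
    ∀ (fuel : Nat) (d : PySem.Dict (Int × Int) Int) (q P : List (Int × Int)) (c : Int),
    q.length + d.size < fuel →
    d.keys.Nodup →
    (P ++ q ++ d.keys).Nodup →
    (∀ k, k ∈ d0.keys ↔ (k ∈ P ∨ k ∈ q ∨ k ∈ d.keys)) →
    (∀ x ∈ q, pvVal d0 P x < 4) →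
    (∀ k ∈ d.keys, d.get? k = some (pvVal d0 P k) ∧ 4 ≤ pvVal d0 P k) →
    ∃ Q, pvLoopA fuel d q c = c + Q.length ∧ pvGood d0 P Q ∧ (P ++ Q).Nodup ∧
      pvComplete d0 (P ++ Q) := by
  intro fuel
  induction fuel with
  | zero => intro d q P c h; omega
  | succ fuel ih =>
    intro d q P c hfuel hnd hppd hpart hqval hval
    match q with
    | [] =>
      refine ⟨[], by simp [pvLoopA], trivial,
        by simpa using List.Nodup.of_append_left (by simpa using hppd), ?_⟩
      intro k hk0 hkP
      simp only [List.append_nil] at hkP ⊢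
      have hkd : k ∈ d.keys := by
        rcases (hpart k).mp hk0 with h | h | h
        · exact absurd h hkP
        · simp at h
        · exact h
      exact (hval k hkd).2
    | curr :: q =>
      have hnsnd : (get_neighbors curr).Nodup := nodup_get_neighbors curr
      obtain ⟨hg, hq, hkn, hsz⟩ := pvStepA_foldl (get_neighbors curr) hnsnd d q hnd
      set st := (get_neighbors curr).foldl pvStepA (d, q) with hstdef
      set new := (get_neighbors curr).filter (pvDrops d) with hnewdef
      clear_value st new
      -- structure of the old nodup hypothesis
      have hPnd : P.Nodup := List.Nodup.of_append_left (by simpa [List.append_assoc] using hppd)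
      have hppd' : (P ++ ((curr :: q) ++ d.keys)).Nodup := by
        simpa [List.append_assoc] using hppd
      obtain ⟨-, hrest, hPdisj⟩ := List.nodup_append.mp hppd'
      obtain ⟨hcqnd, -, hcqdisj⟩ := List.nodup_append.mp hrest
      obtain ⟨hcurrq, hqnd⟩ := List.nodup_cons.mp hcqnd
      have hPdisj' : ∀ x ∈ P, x ≠ curr ∧ x ∉ q ∧ x ∉ d.keys := by
        intro x hx
        refine ⟨hPdisj x hx curr (by simp), ?_, ?_⟩
        · intro h; exact hPdisj x hx x (by simp [h]) rfl
        · intro h; exact hPdisj x hx x (by simp [h]) rfl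
      have hcurrk : curr ∉ d.keys := by
        intro h; exact hcqdisj curr (by simp) curr (by simp [h]) rfl
      have hqdisj : ∀ x ∈ q, x ∉ d.keys := by
        intro x hx h; exact hcqdisj x (by simp [hx]) x (by simp [h]) rfl
      -- pvDrops in terms of pvVal
      have hdrops : ∀ k, pvDrops d k = true ↔ (k ∈ d.keys ∧ pvVal d0 P k - 1 < 4) := by
        intro k
        constructor
        · intro h
          rcases hgk : d.get? k with _ | v
          · rw [pvDrops, hgk] at h; simp at h
          · have hk : k ∈ d.keys := pvMem_of_get?_some d k v hgk
            have hvk := (hval k hk).1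
            rw [pvDrops, hvk] at h
            simp only [decide_eq_true_eq] at h
            exact ⟨hk, h⟩
        · rintro ⟨hk, hlt⟩
          rw [pvDrops, (hval k hk).1]
          simpa using hlt
      have hmemnew : ∀ k, k ∈ new ↔ (k ∈ get_neighbors curr ∧ pvDrops d k = true) := by
        intro k; rw [hnewdef, List.mem_filter]
      have hnewnd : new.Nodup := hnewdef ▸ hnsnd.filter (pvDrops d)
      have hnewsub : ∀ k ∈ new, k ∈ d.keys := by
        intro k hk
        exact ((hdrops k).mp ((hmemnew k).mp hk).2).1
      -- membership in the new dict
      have hmemst : ∀ k, k ∈ st.1.keys ↔ (k ∈ d.keys ∧ k ∉ new) := by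
        intro k
        rw [← not_iff_not, ← PySem.Dict.get?_eq_none_iff_not_mem_keys, hg k, hmemnew k]
        by_cases h1 : k ∈ get_neighbors curr
        · by_cases h2 : pvDrops d k
          · simp [h1, h2, (hdrops k).mp h2]
          · rcases hgk : d.get? k with _ | v
            · have hnk : k ∉ d.keys := (PySem.Dict.get?_eq_none_iff_not_mem_keys d k).mp hgk
              simp [h1, h2, hnk]
            · simp [h1, h2, pvMem_of_get?_some d k v hgk]
        · rcases hgk : d.get? k with _ | v
          · have hnk : k ∉ d.keys := (PySem.Dict.get?_eq_none_iff_not_mem_keys d k).mp hgk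
            simp [h1, hnk]
          · simp [h1, pvMem_of_get?_some d k v hgk]
      -- invariants for the recursive call
      have hval2 : ∀ k ∈ st.1.keys,
          st.1.get? k = some (pvVal d0 (P ++ [curr]) k) ∧ 4 ≤ pvVal d0 (P ++ [curr]) k := by
        intro k hk
        obtain ⟨hkd, hknew⟩ := (hmemst k).mp hk
        have hv := (hval k hkd).1
        have h4 := (hval k hkd).2
        rw [hg k, pvVal_snoc]
        by_cases h1 : k ∈ get_neighbors curr
        · have h2 : ¬ pvDrops d k = true := fun h => hknew ((hmemnew k).mpr ⟨h1, h⟩)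
          have h3 : ¬ (pvVal d0 P k - 1 < 4) := fun h => h2 ((hdrops k).mpr ⟨hkd, h⟩)
          rw [if_pos h1, if_pos h1, if_neg h2, hv]
          exact ⟨rfl, by omega⟩
        · rw [if_neg h1, if_neg h1, hv]
          exact ⟨by simp, by omega⟩
      have hqval2 : ∀ x ∈ st.2, pvVal d0 (P ++ [curr]) x < 4 := by
        intro x hx
        rw [hq] at hx
        rw [pvVal_snoc]
        rcases List.mem_append.mp hx with h | h
        · have := hqval x (by simp [h])
          split_ifs <;> omega
        · obtain ⟨h1, h2⟩ := (hmemnew x).mp h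
          obtain ⟨h3, h4⟩ := (hdrops x).mp h2
          rw [if_pos h1]
          omega
      have hpart2 : ∀ k, k ∈ d0.keys ↔ (k ∈ P ++ [curr] ∨ k ∈ st.2 ∨ k ∈ st.1.keys) := by
        intro k
        rw [hpart k, hq]
        simp only [List.mem_append, List.mem_cons, hmemst k, List.not_mem_nil, or_false]
        have hns' := hnewsub k
        tauto
      have hppd2 : ((P ++ [curr]) ++ st.2 ++ st.1.keys).Nodup := by
        rw [hq]
        have hstsub : ∀ k ∈ st.1.keys, k ∈ d.keys := fun k hk => ((hmemst k).mp hk).1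
        have hstnew : ∀ k ∈ st.1.keys, k ∉ new := fun k hk => ((hmemst k).mp hk).2
        simp only [List.append_assoc, List.nodup_append]
        refine ⟨hPnd, ?_, ?_⟩
        · refine ⟨by simp, ?_, ?_⟩
          · refine ⟨hqnd, ?_, ?_⟩
            · exact ⟨hnewnd, hkn, fun a ha b hb hab => hstnew b hb (hab ▸ ha)⟩
            · intro a ha b hb hab
              subst hab
              rcases List.mem_append.mp hb with h | h
              · exact hqdisj a ha (hnewsub a h)
              · exact hqdisj a ha (hstsub a h)
          · intro a ha b hb hab
            subst hab
            simp only [List.mem_singleton] at ha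
            subst ha
            rcases List.mem_append.mp hb with h | h
            · exact hcurrq h
            · rcases List.mem_append.mp h with h2 | h2
              · exact hcurrk (hnewsub _ h2)
              · exact hcurrk (hstsub _ h2)
        · intro a ha b hb hab
          subst hab
          obtain ⟨hne, hnq, hnk⟩ := hPdisj' a ha
          rcases List.mem_append.mp hb with h | h
          · simp only [List.mem_singleton] at h; exact hne h
          · rcases List.mem_append.mp h with h2 | h2
            · exact hnq h2
            · rcases List.mem_append.mp h2 with h3 | h3
              · exact hnk (hnewsub _ h3)
              · exact hnk (hstsub _ h3)
      have hfuel2 : st.2.length + st.1.size < fuel := by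
        simp only [List.length_cons] at hfuel
        omega
      obtain ⟨Q', hlen, hgood', hnodup', hcomp'⟩ :=
        ih st.1 st.2 (P ++ [curr]) (c + 1) hfuel2 hkn hppd2 hpart2 hqval2 hval2
      refine ⟨curr :: Q', ?_, ?_, ?_, ?_⟩
      · show pvLoopA (fuel + 1) d (curr :: q) c = _
        rw [pvLoopA, ← hstdef, hlen]
        simp only [List.length_cons]
        push_cast
        ring
      · exact ⟨(hpart curr).mpr (Or.inr (Or.inl (by simp))), hqval curr (by simp), hgood'⟩
      · simpa [List.append_assoc] using hnodup'
      · intro k hk hkmem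
        have := hcomp' k hk (by simpa [List.append_assoc] using hkmem)
        simpa [List.append_assoc] using this

lemma pvGet?_of_mem_keys (d : PySem.Dict (Int × Int) Int) (k : Int × Int) (h : k ∈ d.keys) :
    d.get? k = some (d.getD k 0) := by
  rcases hgk : d.get? k with _ | v
  · exact absurd ((PySem.Dict.get?_eq_none_iff_not_mem_keys d k).mp hgk) (by simp [h])
  · rw [PySem.Dict.getD_eq_get?_getD, hgk]
    simp

lemma pvVal_nil (d0 : PySem.Dict (Int × Int) Int) (k : Int × Int) :
    pvVal d0 [] k = d0.getD k 0 := by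
  simp [pvVal]

theorem pv_main (l : List (Int × Int × Int)) :
    topological_removal l = topological_removal_alt l := by
  set d0 := PySem.Dict.ofList (l.map (fun t => ((t.1, t.2.1), t.2.2))) with hd0def
  have hnd0 : d0.keys.Nodup := PySem.Dict.nodup_keys_ofList _
  -- B's side
  have hvalB : ∀ k ∈ d0.keys, d0.get? k = some (pvVal d0 [] k) := by
    intro k hk
    rw [pvVal_nil]
    exact pvGet?_of_mem_keys d0 k hk
  obtain ⟨QB, hBlen, hBgood, hBnodup, hBcomp⟩ :=
    pvLoopB_spec d0 (d0.size + 1) d0 [] 0 (by omega) hnd0 (by simpa using hnd0)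
      (fun k => by simp) hvalB
  -- A's side
  set R0 := (d0.items.filter (fun p => decide (p.2 < 4))).map (·.1) with hR0def
  have hqbuild : d0.items.foldl (fun q p => if 4 ≤ p.2 then q else q ++ [p.1])
      ([] : List (Int × Int)) = R0 := by
    rw [pvQBuild]
    simp only [List.nil_append]
    exact hR0def.symm
  have hR0subl := pvRem_sublist d0
  have hR0nd : R0.Nodup := hR0subl.nodup hnd0
  have hR0sub : R0 ⊆ d0.keys := hR0subl.subset
  have hmemR0 : ∀ k, k ∈ R0 ↔ k ∈ d0.keys ∧ d0.getD k 0 < 4 := pvMem_rem d0 hnd0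
  set d1 := R0.foldl (fun d cell => d.erase cell) d0 with hd1def
  have hkeys1 : d1.keys = d0.keys.filter (fun x => decide (x ∉ R0)) := pvKeys_eraseFold R0 d0
  have hnd1 : d1.keys.Nodup := by rw [hkeys1]; exact hnd0.filter _
  have hmem1 : ∀ k, k ∈ d1.keys ↔ (k ∈ d0.keys ∧ k ∉ R0) := by
    intro k; rw [hkeys1]; simp
  have hget1 : ∀ k, k ∉ R0 → d1.get? k = d0.get? k := by
    intro k hk
    rw [hd1def, pvGet?_eraseFold, if_neg hk]
  have hvalA : ∀ k ∈ d1.keys, d1.get? k = some (pvVal d0 [] k) ∧ 4 ≤ pvVal d0 [] k := by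
    intro k hk
    obtain ⟨hk0, hkR⟩ := (hmem1 k).mp hk
    have h4 : ¬ d0.getD k 0 < 4 := fun h => hkR ((hmemR0 k).mpr ⟨hk0, h⟩)
    rw [hget1 k hkR, pvVal_nil]
    exact ⟨pvGet?_of_mem_keys d0 k hk0, by omega⟩
  have hqvalA : ∀ x ∈ R0, pvVal d0 [] x < 4 := by
    intro x hx
    rw [pvVal_nil]
    exact ((hmemR0 x).mp hx).2
  have hpartA : ∀ k, k ∈ d0.keys ↔ (k ∈ ([] : List (Int × Int)) ∨ k ∈ R0 ∨ k ∈ d1.keys) := by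
    intro k
    rw [hmem1 k]
    constructor
    · intro h
      by_cases hkR : k ∈ R0
      · exact Or.inr (Or.inl hkR)
      · exact Or.inr (Or.inr ⟨h, hkR⟩)
    · rintro (h | h | ⟨h, -⟩)
      · simp at h
      · exact hR0sub h
      · exact h
  have hppdA : (([] : List (Int × Int)) ++ R0 ++ d1.keys).Nodup := by
    simp only [List.nil_append, List.nodup_append]
    refine ⟨hR0nd, hnd1, ?_⟩
    intro a ha b hb hab
    subst hab
    exact ((hmem1 a).mp hb).2 ha
  obtain ⟨QA, hAlen, hAgood, hAnodup, hAcomp⟩ :=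
    pvLoopA_spec d0 (R0.length + d1.size + 1) d1 R0 [] 0 (by omega) hnd1 hppdA hpartA
      hqvalA hvalA
  -- both programs compute the length of a good complete sequence
  have hres : topological_removal l = (QA.length : Int) := by
    show pvLoopA _ _ _ 0 = _
    rw [hqbuild, ← hd1def, hAlen]
    simp
  have hresB : topological_removal_alt l = (QB.length : Int) := by
    show pvLoopB _ _ 0 = _
    rw [hBlen]
    simp
  rw [hres, hresB,
    pvLength_unique d0 hAgood (by simpa using hAnodup) (by simpa using hAcomp)
      hBgood (by simpa using hBnodup) (by simpa using hBcomp)]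

-- ===== VERDICT (by name: the statement is the Claim_ definition above) =====
theorem topological_removal_spec : Claim_equal_topological_removal := by
  intro indegrees_by_roll _
  unfold Spec_topological_removal
  exact pv_main indegrees_by_roll
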